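-- pv_equiv track=rewrite | github.com/gsethupathy5/AI_For_CS | python/1269.number-of-ways-to-stay-in-the-same-place-after-some-steps/solution.py | numWays
-- ===== SOURCE A (Python) =====
-- def numWays(steps: int, arrLen: int) -> int:
--     MOD = 10**9 + 7
--     max_pos = min(arrLen - 1, steps)
--     dp = [[0] * (max_pos + 1) for _ in range(steps + 1)]
--     dp[0][0] = 1
--
--     for i in range(1, steps + 1):
--         for j in range(0, max_pos + 1):
--             dp[i][j] = dp[i - 1][j]
--             if j > 0:
--                 dp[i][j] = (dp[i][j] + dp[i - 1][j - 1]) % MOD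
--             if j < max_pos:
--                 dp[i][j] = (dp[i][j] + dp[i - 1][j + 1]) % MOD
--
--     return dp[steps][0]
-- ===== SOURCE B (Python) =====
-- def numWays(steps: int, arrLen: int) -> int:
--     MOD = 10**9 + 7
--     limit = min(arrLen - 1, steps)
--     memo = [[None] * (limit + 1) for _ in range(steps + 1)]  # memo[rem][pos]
--     stack = [(0, steps, False)]
--     while stack:
--         pos, rem, expanded = stack.pop()
--         if memo[rem][pos] is not None:
--             continue
--         if rem == 0:
--             memo[rem][pos] = 1 if pos == 0 else 0
--             continue
--         if pos > rem:
--             memo[rem][pos] = 0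
--             continue
--         children = [p for p in (pos, pos - 1, pos + 1) if 0 <= p <= limit]
--         if expanded:
--             memo[rem][pos] = sum(memo[rem - 1][p] for p in children) % MOD
--         else:
--             stack.append((pos, rem, True))
--             stack.extend((p, rem - 1, False) for p in children)
--     return memo[steps][0]
-- ===== Notes on version B (the rewrite author's own statement) =====
-- stated objective: alternative
-- what changed: Replaces the bottom-up table sweep by demand-driven memoized evaluation of the state graph (pos, rem) with an explicit DFS stack and a memo dict, computing only the states reachable from (0, steps) and pruning states with pos > rem.
import Mathlib
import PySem

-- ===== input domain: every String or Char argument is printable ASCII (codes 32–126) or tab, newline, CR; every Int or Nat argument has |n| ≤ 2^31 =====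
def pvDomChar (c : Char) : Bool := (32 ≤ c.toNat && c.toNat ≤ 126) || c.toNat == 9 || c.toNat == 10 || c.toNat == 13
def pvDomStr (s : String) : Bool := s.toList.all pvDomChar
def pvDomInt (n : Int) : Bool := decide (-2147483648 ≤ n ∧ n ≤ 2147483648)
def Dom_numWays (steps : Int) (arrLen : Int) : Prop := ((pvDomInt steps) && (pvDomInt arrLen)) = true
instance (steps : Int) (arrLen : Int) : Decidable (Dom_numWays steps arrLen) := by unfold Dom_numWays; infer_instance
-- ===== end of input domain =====

-- B replaces A's bottom-up table sweep by demand-driven memoized evaluation of the state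
-- graph (pos, rem), run with an explicit DFS stack and a memo table (objective: alternative).

-- ===== PORT A =====
-- A-side helpers: dp[i][j] read / write on the table (indices are nonnegative at every use
-- site inside Pre_, where .toNat is exact; the table is an Array for constant-time row access)
def pvGetCell (dp : Array (Array Int)) (i j : Int) : Int :=
  (dp.getD i.toNat #[]).getD j.toNat 0

def pvSetCell (dp : Array (Array Int)) (i j : Int) (v : Int) : Array (Array Int) :=
  dp.modify i.toNat (fun row => row.setIfInBounds j.toNat v)

-- the body of A's inner 'for j' loop, line for line
def pvInnerBody (maxPos i : Int) (dp : Array (Array Int)) (j : Int) : Array (Array Int) :=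
  let dp := pvSetCell dp i j (pvGetCell dp (i-1) j)
  let dp := if j > 0 then
      pvSetCell dp i j (PySem.Int.mod (pvGetCell dp i j + pvGetCell dp (i-1) (j-1)) 1000000007)
    else dp
  if j < maxPos then
    pvSetCell dp i j (PySem.Int.mod (pvGetCell dp i j + pvGetCell dp (i-1) (j+1)) 1000000007)
  else dp

-- the body of A's outer 'for i' loop
def pvOuterBody (maxPos : Int) (dp : Array (Array Int)) (i : Int) : Array (Array Int) :=
  (PySem.List.pyRange 0 (maxPos + 1)).foldl (pvInnerBody maxPos i) dp

def numWays (steps : Int) (arrLen : Int) : Int :=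
  let maxPos : Int := min (arrLen - 1) steps
  let dp : Array (Array Int) :=
    ((PySem.List.pyRange 0 (steps + 1)).map
      (fun _ => Array.replicate (maxPos + 1).toNat (0:Int))).toArray
  let dp := pvSetCell dp 0 0 1
  let dp := (PySem.List.pyRange 1 (steps + 1)).foldl (pvOuterBody maxPos) dp
  pvGetCell dp steps 0

-- ===== PORT B =====
-- B-side helpers. The memo is a (steps+1) x (limit+1) table of Option Int (Python's
-- list-of-lists of None/int); on every admitted input the trace only indexes it with
-- nonnegative in-range rem/pos, where .toNat is exact and setIfInBounds matches Python's
-- 'memo[rem][pos] = v'.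
def pvChildren (limit pos : Int) : List Int :=
  [pos, pos - 1, pos + 1].filter (fun p => decide (0 ≤ p) && decide (p ≤ limit))

def pvMGet (memo : Array (Array (Option Int))) (rem pos : Int) : Option Int :=
  (memo.getD rem.toNat #[]).getD pos.toNat none

def pvMSet (memo : Array (Array (Option Int))) (rem pos : Int) (v : Int) :
    Array (Array (Option Int)) :=
  memo.modify rem.toNat (fun row => row.setIfInBounds pos.toNat (some v))

-- B's 'while stack:' loop; 'fuel' only bounds the number of iterations to make the loop
-- total (the fuel passed by numWays_alt is proved sufficient below, so it never runs out).
-- 'memo[rem-1][p]' in the combine branch is ported as '(pvMGet …).getD 0': the cell is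
-- always filled there (children frames sit above their combine frame; proved below), so
-- the default is never used.
def pvLoop (limit : Int) : Nat → List (Int × Int × Bool) → Array (Array (Option Int)) →
    Array (Array (Option Int))
  | 0, _, memo => memo
  | _ + 1, [], memo => memo
  | fuel + 1, (pos, rem, expanded) :: stack, memo =>
    if (pvMGet memo rem pos).isSome then pvLoop limit fuel stack memo
    else if rem = 0 then
      pvLoop limit fuel stack (pvMSet memo rem pos (if pos = 0 then 1 else 0))
    else if pos > rem then pvLoop limit fuel stack (pvMSet memo rem pos 0)
    else
      let children := pvChildren limit pos
      if expanded then
        pvLoop limit fuel stack (pvMSet memo rem pos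
          (PySem.Int.mod (children.foldl (fun s p => s + (pvMGet memo (rem - 1) p).getD 0) 0)
            1000000007))
      else
        pvLoop limit fuel
          ((children.map (fun p => (p, rem - 1, false))).reverse ++ (pos, rem, true) :: stack)
          memo

def numWays_alt (steps : Int) (arrLen : Int) : Int :=
  let limit : Int := min (arrLen - 1) steps
  let memo : Array (Array (Option Int)) :=
    ((PySem.List.pyRange 0 (steps + 1)).map
      (fun _ => Array.replicate (limit + 1).toNat (none : Option Int))).toArray
  let memo := pvLoop limit (4 * ((steps + 1).toNat * (limit + 1).toNat) + 2)
    [(0, steps, false)] memo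
  -- 'return memo[steps][0]': the cell is filled when the loop ends (proved below)
  (pvMGet memo steps 0).getD 0

-- ===== PRECONDITION & SPEC =====
-- exactly the inputs on which the Python A returns (elsewhere dp[0][0] = 1 raises IndexError)
def Pre_numWays (steps : Int) (arrLen : Int) : Prop := 0 ≤ steps ∧ 1 ≤ arrLen
instance (steps : Int) (arrLen : Int) : Decidable (Pre_numWays steps arrLen) := by
  unfold Pre_numWays; infer_instance

def pvWitness_numWays : Int × Int := (3, 2)


def Spec_numWays (steps : Int) (arrLen : Int) (out : Int) : Prop := out = numWays_alt steps arrLen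
instance (steps : Int) (arrLen : Int) (out : Int) : Decidable (Spec_numWays steps arrLen out) := by
  unfold Spec_numWays; infer_instance

-- ===== CLAIM (what is proved, stated in full; the proofs are below) =====
def Claim_equal_numWays : Prop := ∀ (steps : Int) (arrLen : Int), Dom_numWays steps arrLen →
  Pre_numWays steps arrLen → Spec_numWays steps arrLen (numWays steps arrLen)


-- ===== LEMMAS AND PROOFS =====

-- the pure value of B's memoized state (pos, rem): pvG limit rem pos
def pvG (limit : Int) : Nat → Int → Int
  | 0, p => if p = 0 then 1 else 0
  | n + 1, p =>
    if p > (n : Int) + 1 then 0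
    else
      PySem.Int.mod
        ((if 0 ≤ p ∧ p ≤ limit then pvG limit n p else 0)
          + (if 0 ≤ p - 1 ∧ p - 1 ≤ limit then pvG limit n (p - 1) else 0)
          + (if 0 ≤ p + 1 ∧ p + 1 ≤ limit then pvG limit n (p + 1) else 0)) 1000000007

-- the total cell accessor and the invariants of the memo table
def pvEntry (memo : Array (Array (Option Int))) (i j : Nat) : Option Int :=
  (((memo[i]?).getD #[])[j]?).getD none

-- number of still-empty cells (the loop's termination budget)
def pvFree (memo : Array (Array (Option Int))) : Nat :=
  (memo.toList.map (fun row => row.toList.countP (fun o => o.isNone))).sum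

def pvDims (S limit : Int) (memo : Array (Array (Option Int))) : Prop :=
  memo.size = (S + 1).toNat ∧ ∀ i, (h : i < memo.size) → (memo[i]'h).size = (limit + 1).toNat

def pvMOK (limit : Int) (memo : Array (Array (Option Int))) : Prop :=
  ∀ i j v, pvEntry memo i j = some v → v = pvG limit i (j : Int)

lemma pvLoop_nil (limit : Int) (fuel : Nat) (memo : Array (Array (Option Int))) :
    pvLoop limit fuel [] memo = memo := by cases fuel <;> rfl

lemma pvAGetD_lt {α : Type} (a : Array α) (n : Nat) (d : α) (h : n < a.size) :
    a.getD n d = a[n] := by simp [Array.getD, h]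

lemma pvAGetD_ge {α : Type} (a : Array α) (n : Nat) (d : α) (h : ¬ n < a.size) :
    a.getD n d = d := by simp [Array.getD, h]

lemma pvGetD_opt {α : Type} (a : Array α) (n : Nat) (d : α) : a.getD n d = (a[n]?).getD d := by
  by_cases h : n < a.size
  · rw [pvAGetD_lt a n d h, Array.getElem?_eq_getElem h]
    rfl
  · rw [pvAGetD_ge a n d h, Array.getElem?_eq_none (by omega)]
    rfl

lemma pvMGet_entry (memo : Array (Array (Option Int))) (r p : Int) :
    pvMGet memo r p = pvEntry memo r.toNat p.toNat := by
  unfold pvMGet pvEntry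
  rw [pvGetD_opt memo r.toNat #[], pvGetD_opt _ p.toNat none]

lemma pvEntry_eq_getElem (memo : Array (Array (Option Int))) (i j : Nat)
    (hi : i < memo.size) (hj : j < (memo[i]'hi).size) :
    pvEntry memo i j = (memo[i]'hi)[j]'hj := by
  unfold pvEntry
  rw [Array.getElem?_eq_getElem hi]
  show ((memo[i]'hi)[j]?).getD none = _
  rw [Array.getElem?_eq_getElem hj]
  rfl

lemma pvEntry_mset (memo : Array (Array (Option Int))) (a b : Nat) (v : Int)
    (ha : a < memo.size) (hb : b < (memo[a]'ha).size) (i j : Nat) :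
    pvEntry (memo.modify a (fun row => row.setIfInBounds b (some v))) i j
      = if a = i ∧ b = j then some v else pvEntry memo i j := by
  unfold pvEntry
  rw [Array.getElem?_modify]
  by_cases hai : a = i
  · subst hai
    rw [if_pos rfl, Array.getElem?_eq_getElem ha]
    show ((((memo[a]'ha).setIfInBounds b (some v))[j]?).getD none) = _
    rw [Array.getElem?_setIfInBounds]
    by_cases hbj : b = j
    · subst hbj
      rw [if_pos rfl, if_pos hb, if_pos ⟨rfl, rfl⟩]
      rfl
    · rw [if_neg hbj, if_neg (by tauto)]
      rfl
  · rw [if_neg hai, if_neg (by tauto)]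

lemma pvDims_mset (S limit : Int) (memo : Array (Array (Option Int)))
    (hd : pvDims S limit memo) (a b : Nat) (v : Int) :
    pvDims S limit (memo.modify a (fun row => row.setIfInBounds b (some v))) := by
  obtain ⟨h1, h2⟩ := hd
  refine ⟨by rw [Array.size_modify]; exact h1, ?_⟩
  intro i hi
  have hi' : i < memo.size := by rw [Array.size_modify] at hi; exact hi
  rw [Array.getElem_modify hi]
  by_cases hai : a = i
  · rw [if_pos hai, Array.size_setIfInBounds]
    exact h2 i hi'
  · rw [if_neg hai]
    exact h2 i hi'

lemma pvSumMapSet {α : Type} (F : α → Nat) : ∀ (l : List α) (i : Nat) (x : α)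
    (h : i < l.length), F x + 1 = F (l[i]'h) →
    ((l.set i x).map F).sum + 1 = (l.map F).sum := by
  intro l
  induction l with
  | nil => intro i x h; simp at h
  | cons y t ih =>
    intro i x h hle
    cases i with
    | zero =>
      simp only [List.set_cons_zero, List.map_cons, List.sum_cons]
      simp only [List.getElem_cons_zero] at hle
      omega
    | succ i =>
      simp only [List.set_cons_succ, List.map_cons, List.sum_cons]
      simp only [List.getElem_cons_succ] at hle
      have := ih i x (by simpa using h) hle
      omega

lemma pvFree_mset (memo : Array (Array (Option Int))) (a b : Nat) (v : Int)
    (ha : a < memo.size) (hb : b < (memo[a]'ha).size)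
    (hnone : pvEntry memo a b = none) :
    pvFree (memo.modify a (fun row => row.setIfInBounds b (some v))) + 1 = pvFree memo := by
  have hcell : ((memo[a]'ha)[b]'hb) = none := by
    rw [pvEntry_eq_getElem memo a b ha hb] at hnone
    exact hnone
  unfold pvFree
  rw [Array.toList_modify, List.modify_eq_set_get _ (by simpa using ha)]
  have hget : memo.toList.get ⟨a, by simpa using ha⟩ = memo[a]'ha := by
    simp [List.get_eq_getElem]
  rw [hget]
  apply pvSumMapSet (fun row => row.toList.countP (fun o => o.isNone)) memo.toList a
    _ (by simpa using ha)
  have hgetl : (memo.toList[a]'(by simpa using ha)) = memo[a]'ha := by simp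
  rw [hgetl, Array.toList_setIfInBounds]
  have hblen : b < (memo[a]'ha).toList.length := by simpa using hb
  rw [List.countP_set hblen]
  have hcnt : 0 < (memo[a]'ha).toList.countP (fun o => o.isNone) := by
    rw [List.countP_pos_iff]
    exact ⟨none, by rw [← hcell]; exact List.getElem_mem hblen, rfl⟩
  have hcl : ((memo[a]'ha).toList[b]'hblen) = none := by
    rw [← hcell]
    simp
  rw [hcl]
  simp only [Option.isNone_none, Option.isNone_some, if_true, Bool.false_eq_true, if_false]
  omega

lemma pvKids_foldl (limit p : Int) (g : Int → Int) :
    (([p, p - 1, p + 1].filter (fun q => decide (0 ≤ q) && decide (q ≤ limit))).foldl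
        (fun s q => s + g q) 0)
      = (if 0 ≤ p ∧ p ≤ limit then g p else 0)
        + (if 0 ≤ p - 1 ∧ p - 1 ≤ limit then g (p - 1) else 0)
        + (if 0 ≤ p + 1 ∧ p + 1 ≤ limit then g (p + 1) else 0) := by
  simp only [List.filter_cons, List.filter_nil, Bool.and_eq_true, decide_eq_true_eq]
  split_ifs <;> first | omega | (simp only [List.foldl]; ring)

-- writing the correct value into a fresh cell preserves all the memo invariants
lemma pvInsertStep (S limit : Int) (memo : Array (Array (Option Int)))
    (hd : pvDims S limit memo) (hok : pvMOK limit memo)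
    (p r w : Int) (h0p : 0 ≤ p) (hpl : p ≤ limit) (h0r : 0 ≤ r) (hrS : r ≤ S)
    (hmem : pvEntry memo r.toNat p.toNat = none)
    (hw : w = pvG limit r.toNat p) :
    pvDims S limit (pvMSet memo r p w) ∧ pvMOK limit (pvMSet memo r p w) ∧
    (pvFree (pvMSet memo r p w) + 1 = pvFree memo) ∧
    (∀ i j v, pvEntry memo i j = some v → pvEntry (pvMSet memo r p w) i j = some v) ∧
    ((pvEntry (pvMSet memo r p w) r.toNat p.toNat).isSome = true) ∧
    (∀ i j, pvEntry memo i j = none → (pvEntry (pvMSet memo r p w) i j).isSome = true →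
      (i : Int) ≤ r) := by
  have ha : r.toNat < memo.size := by
    rw [hd.1]; omega
  have hb : p.toNat < (memo[r.toNat]'ha).size := by
    rw [hd.2 r.toNat ha]; omega
  have hE := pvEntry_mset memo r.toNat p.toNat w ha hb
  refine ⟨pvDims_mset S limit memo hd _ _ _, ?_, ?_, ?_, ?_, ?_⟩
  · intro i j v h
    rw [pvMSet] at h
    rw [hE i j] at h
    split_ifs at h with hk
    · obtain ⟨hk1, hk2⟩ := hk
      injection h with h
      rw [← h, hw, ← hk1, ← hk2, Int.toNat_of_nonneg h0p]
    · exact hok i j v h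
  · exact pvFree_mset memo r.toNat p.toNat w ha hb hmem
  · intro i j v h
    rw [pvMSet, hE i j]
    split_ifs with hk
    · obtain ⟨hk1, hk2⟩ := hk
      rw [← hk1, ← hk2] at h
      rw [hmem] at h
      cases h
    · exact h
  · rw [pvMSet, hE, if_pos ⟨rfl, rfl⟩]
    rfl
  · intro i j h1 h2
    rw [pvMSet, hE i j] at h2
    split_ifs at h2 with hk
    · omega
    · rw [h1] at h2
      cases h2

-- processing a block of unexpanded frames, one after the other
lemma pvChain (S limit : Int) (n : Nat) (r1 : Int)
    (STEP : ∀ (p : Int), 0 ≤ p → p ≤ limit →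
      ∀ (memo : Array (Array (Option Int))), pvDims S limit memo → pvMOK limit memo →
      ∃ (k : Nat) (memo' : Array (Array (Option Int))),
        pvDims S limit memo' ∧ pvMOK limit memo' ∧
        (k + 4 * pvFree memo' ≤ 4 * pvFree memo + 1) ∧
        (∀ i j v, pvEntry memo i j = some v → pvEntry memo' i j = some v) ∧
        ((pvEntry memo' r1.toNat p.toNat).isSome = true) ∧
        (∀ i j, pvEntry memo i j = none → (pvEntry memo' i j).isSome = true → (i : Int) ≤ r1) ∧
        (∀ fuel rest, pvLoop limit (fuel + k) ((p, r1, false) :: rest) memo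
          = pvLoop limit fuel rest memo')) :
    ∀ (qs : List Int), (∀ q ∈ qs, 0 ≤ q ∧ q ≤ limit) →
    ∀ (memo : Array (Array (Option Int))), pvDims S limit memo → pvMOK limit memo →
    ∃ (k : Nat) (memo' : Array (Array (Option Int))),
      pvDims S limit memo' ∧ pvMOK limit memo' ∧
      (k + 4 * pvFree memo' ≤ 4 * pvFree memo + qs.length) ∧
      (∀ i j v, pvEntry memo i j = some v → pvEntry memo' i j = some v) ∧
      (∀ q ∈ qs, (pvEntry memo' r1.toNat q.toNat).isSome = true) ∧
      (∀ i j, pvEntry memo i j = none → (pvEntry memo' i j).isSome = true → (i : Int) ≤ r1) ∧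
      (∀ fuel rest, pvLoop limit (fuel + k) ((qs.map (fun q => (q, r1, false))) ++ rest) memo
        = pvLoop limit fuel rest memo') := by
  intro qs
  induction qs with
  | nil =>
    intro _ memo hd hok
    refine ⟨0, memo, hd, hok, by simp, fun _ _ _ h => h, by simp, ?_, fun fuel rest => rfl⟩
    intro i j h1 h2
    rw [h1] at h2
    cases h2
  | cons q qs ih =>
    intro hqs memo hd hok
    obtain ⟨hq0, hql⟩ := hqs q List.mem_cons_self
    obtain ⟨k1, memo1, hd1, hok1, hk1, hext1, hsome1, hnew1, heq1⟩ :=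
      STEP q hq0 hql memo hd hok
    obtain ⟨k2, memo2, hd2, hok2, hk2, hext2, hsome2, hnew2, heq2⟩ :=
      ih (fun q' hq' => hqs q' (List.mem_cons_of_mem _ hq')) memo1 hd1 hok1
    refine ⟨k1 + k2, memo2, hd2, hok2, ?_, fun i j v h => hext2 _ _ _ (hext1 _ _ _ h),
      ?_, ?_, ?_⟩
    · simp only [List.length_cons]
      omega
    · intro q' hq'
      rcases List.mem_cons.mp hq' with h | h
      · subst h
        obtain ⟨v, hv⟩ := Option.isSome_iff_exists.mp hsome1
        rw [hext2 _ _ _ hv]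
        rfl
      · exact hsome2 q' h
    · intro i j h1 h2
      cases hm1 : pvEntry memo1 i j with
      | some v => exact hnew1 i j h1 (by rw [hm1]; rfl)
      | none => exact hnew2 i j hm1 h2
    · intro fuel rest
      rw [show fuel + (k1 + k2) = (fuel + k2) + k1 by omega, List.map_cons, List.cons_append,
        heq1 (fuel + k2) ((qs.map (fun q => (q, r1, false))) ++ rest), heq2 fuel rest]

lemma pvStep (S limit : Int) (n : Nat) : ∀ (p r : Int), r.toNat = n → 0 ≤ r → r ≤ S →
    0 ≤ p → p ≤ limit →
    ∀ memo, pvDims S limit memo → pvMOK limit memo →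
    ∃ (k : Nat) (memo' : Array (Array (Option Int))),
      pvDims S limit memo' ∧ pvMOK limit memo' ∧
      (k + 4 * pvFree memo' ≤ 4 * pvFree memo + 1) ∧
      (∀ i j v, pvEntry memo i j = some v → pvEntry memo' i j = some v) ∧
      ((pvEntry memo' r.toNat p.toNat).isSome = true) ∧
      (∀ i j, pvEntry memo i j = none → (pvEntry memo' i j).isSome = true → (i : Int) ≤ r) ∧
      (∀ fuel rest, pvLoop limit (fuel + k) ((p, r, false) :: rest) memo
        = pvLoop limit fuel rest memo') := by
  induction n with
  | zero =>
    intro p r hn hr hrS h0p hpl memo hd hok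
    have hr0 : r = 0 := by omega
    subst hr0
    by_cases hmem : (pvMGet memo 0 p).isSome = true
    · refine ⟨1, memo, hd, hok, by omega, fun _ _ _ h => h,
        (by rw [← pvMGet_entry]; exact hmem), ?_, ?_⟩
      · intro i j h1 h2
        rw [h1] at h2
        cases h2
      · intro fuel rest
        simp only [pvLoop]
        rw [if_pos hmem]
    · have hnone : pvEntry memo (0 : Int).toNat p.toNat = none := by
        rw [← pvMGet_entry]
        exact Option.not_isSome_iff_eq_none.mp (by simpa using hmem)
      obtain ⟨i0, i1, i2, i3, i4, i5⟩ := pvInsertStep S limit memo hd hok p 0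
        (if p = 0 then 1 else 0) h0p hpl le_rfl hrS hnone (by simp only [pvG, Int.toNat_zero])
      refine ⟨1, pvMSet memo 0 p (if p = 0 then 1 else 0), i0, i1, by omega, i3, i4, i5, ?_⟩
      intro fuel rest
      simp only [pvLoop]
      rw [if_neg (by simpa using hmem)]
      simp
  | succ n ih =>
    intro p r hn hr hrS h0p hpl memo hd hok
    have hrv : r = (n : Int) + 1 := by omega
    subst hrv
    have htn : ((n : Int) + 1).toNat = n + 1 := by omega
    by_cases hmem : (pvMGet memo ((n : Int) + 1) p).isSome = true
    · refine ⟨1, memo, hd, hok, by omega, fun _ _ _ h => h,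
        (by rw [← pvMGet_entry]; exact hmem), ?_, ?_⟩
      · intro i j h1 h2
        rw [h1] at h2
        cases h2
      · intro fuel rest
        simp only [pvLoop]
        rw [if_pos hmem]
    · have hnone : pvEntry memo ((n : Int) + 1).toNat p.toNat = none := by
        rw [← pvMGet_entry]
        exact Option.not_isSome_iff_eq_none.mp (by simpa using hmem)
      by_cases hpr : p > (n : Int) + 1
      · -- pruned: pos > rem, so the state is unreachable in time and gets value 0
        obtain ⟨i0, i1, i2, i3, i4, i5⟩ := pvInsertStep S limit memo hd hok p ((n : Int) + 1) 0
          h0p hpl (by omega) hrS hnone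
          (by rw [htn]; simp only [pvG]; rw [if_pos hpr])
        refine ⟨1, pvMSet memo ((n : Int) + 1) p 0, i0, i1, by omega, i3, i4, i5, ?_⟩
        intro fuel rest
        simp only [pvLoop]
        rw [if_neg (by simpa using hmem)]
        rw [if_neg (show ¬((n : Int) + 1 = 0) by omega)]
        rw [if_pos hpr]
      · -- expand: push the combine frame and the children, then combine
        set kids : List Int := pvChildren limit p with hkids
        have hqs : ∀ q ∈ kids.reverse, 0 ≤ q ∧ q ≤ limit := by
          intro q hq
          rw [List.mem_reverse, hkids, pvChildren, List.mem_filter] at hq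
          have := hq.2
          simp only [Bool.and_eq_true, decide_eq_true_eq] at this
          exact this
        obtain ⟨kc, memoc, hdc, hokc, hkc, hextc, hsomec, hnewc, heqc⟩ :=
          pvChain S limit n (n : Int)
            (fun p' h0' hl' memo' hd' hok' =>
              ih p' (n : Int) (by omega) (by omega) (by omega) h0' hl' memo' hd' hok')
            kids.reverse hqs memo hd hok
        have hklen : kids.length ≤ 3 := by
          have := List.length_filter_le
            (fun q => decide (0 ≤ q) && decide (q ≤ limit)) [p, p - 1, p + 1]
          simpa [hkids, pvChildren] using this
        -- the (rem, pos) cell is still empty after the children: new cells all have row ≤ n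
        have hpnc : pvEntry memoc ((n : Int) + 1).toNat p.toNat = none := by
          cases hmc : pvEntry memoc ((n : Int) + 1).toNat p.toNat with
          | none => rfl
          | some v =>
            have := hnewc _ _ hnone (by rw [hmc]; rfl)
            omega
        -- the value written by the combine frame
        set fsum : Int := (pvChildren limit p).foldl
          (fun s q => s + (pvMGet memoc ((n : Int) + 1 - 1) q).getD 0) 0 with hfsum
        have hval : PySem.Int.mod fsum 1000000007 = pvG limit (n + 1) p := by
          have hfold : fsum = kids.foldl (fun s q => s + pvG limit n q) 0 := by
            rw [hfsum, ← hkids]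
            apply PySem.List.foldl_congr_mem
            intro acc q hq
            have hq' := hqs q (by rwa [List.mem_reverse])
            have hqs' := hsomec q (by rwa [List.mem_reverse])
            obtain ⟨v, hv⟩ := Option.isSome_iff_exists.mp hqs'
            have hmg : pvMGet memoc ((n : Int) + 1 - 1) q = some v := by
              rw [show (n : Int) + 1 - 1 = (n : Int) by ring]
              rw [pvMGet_entry memoc (n : Int) q, Int.toNat_natCast]
              exact hv
            rw [hmg]
            have := hokc _ _ _ hv
            rw [Int.toNat_natCast, Int.toNat_of_nonneg hq'.1] at this
            rw [← this]
            rfl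
          rw [hfold, hkids, pvChildren, pvKids_foldl]
          simp only [pvG]
          rw [if_neg hpr]
        obtain ⟨i0, i1, i2, i3, i4, i5⟩ := pvInsertStep S limit memoc hdc hokc p ((n : Int) + 1)
          (PySem.Int.mod fsum 1000000007) h0p hpl (by omega) hrS hpnc (by rw [htn, hval])
        refine ⟨kc + 2, pvMSet memoc ((n : Int) + 1) p (PySem.Int.mod fsum 1000000007),
          i0, i1, ?_, ?_, i4, ?_, ?_⟩
        · have : kids.reverse.length ≤ 3 := by simpa using hklen
          omega
        · intro i j v h
          exact i3 _ _ _ (hextc _ _ _ h)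
        · intro i j h1 h2
          cases hm1 : pvEntry memoc i j with
          | some v =>
            have := hnewc i j h1 (by rw [hm1]; rfl)
            omega
          | none =>
            have := i5 i j hm1 h2
            omega
        · intro fuel rest
          rw [show fuel + (kc + 2) = (((fuel + 1) + kc) + 1) by omega]
          simp only [pvLoop]
          rw [if_neg (by simpa using hmem)]
          rw [if_neg (show ¬((n : Int) + 1 = 0) by omega)]
          rw [if_neg hpr]
          rw [if_neg (show ¬(false = true) by simp)]
          rw [← hkids]
          have hstack : (kids.map (fun q => (q, (n : Int) + 1 - 1, false))).reverse
              = kids.reverse.map (fun q => (q, (n : Int), false)) := by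
            rw [show (n : Int) + 1 - 1 = (n : Int) by ring]
            exact List.map_reverse.symm
          rw [hstack, heqc (fuel + 1) ((p, (n : Int) + 1, true) :: rest)]
          simp only [pvLoop]
          rw [if_neg (show ¬((pvMGet memoc ((n : Int) + 1) p).isSome = true) by
            rw [pvMGet_entry memoc ((n : Int) + 1) p, hpnc]
            simp)]
          rw [if_neg (show ¬((n : Int) + 1 = 0) by omega)]
          rw [if_neg hpr]
          simp
          rw [hfsum]
          rw [show (n : Int) + 1 - 1 = (n : Int) by ring]

lemma pvRange_len (W : Int) (hW : 0 ≤ W) : (PySem.List.pyRange 0 W).length = W.toNat := by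
  rw [show W = ((W.toNat : Nat) : Int) by omega, PySem.List.pyRange_zero_natCast]
  simp
  omega

lemma pvRepl (n j : Nat) : ((Array.replicate n (none : Option Int))[j]?).getD none = none := by
  by_cases hj : j < n
  · rw [Array.getElem?_eq_getElem (by simpa using hj)]
    simp [Array.getElem_replicate]
  · rw [Array.getElem?_eq_none (by simpa using hj)]
    rfl

-- B's port evaluates the demand-driven recursion at (0, steps)
lemma pvB_eq (steps arrLen : Int) (hs : 0 ≤ steps) (ha : 1 ≤ arrLen) :
    numWays_alt steps arrLen = pvG (min (arrLen - 1) steps) steps.toNat 0 := by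
  set limit : Int := min (arrLen - 1) steps with hlimit
  have hl0 : 0 ≤ limit := by omega
  set memo0 : Array (Array (Option Int)) :=
    ((PySem.List.pyRange 0 (steps + 1)).map
      (fun _ => Array.replicate (limit + 1).toNat (none : Option Int))).toArray with hmemo0
  have htl : memo0.toList = (PySem.List.pyRange 0 (steps + 1)).map
      (fun _ => Array.replicate (limit + 1).toNat (none : Option Int)) := by
    rw [hmemo0, List.toList_toArray]
  have hsz : memo0.size = (steps + 1).toNat := by
    rw [← Array.length_toList, htl, List.length_map, pvRange_len _ (by omega)]
  have hrowv : ∀ i, i < memo0.size →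
      memo0[i]? = some (Array.replicate (limit + 1).toNat (none : Option Int)) := by
    intro i hi
    have hi' : i < (PySem.List.pyRange 0 (steps + 1)).length := by
      rw [pvRange_len _ (by omega)]
      rw [hsz] at hi
      exact hi
    rw [← Array.getElem?_toList, htl, List.getElem?_map, List.getElem?_eq_getElem hi']
    rfl
  have hrows : ∀ i, (h : i < memo0.size) → (memo0[i]'h).size = (limit + 1).toNat := by
    intro i h
    have h1 := hrowv i h
    rw [Array.getElem?_eq_getElem h] at h1
    injection h1 with h1
    rw [h1, Array.size_replicate]
  have hent0 : ∀ i j, pvEntry memo0 i j = none := by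
    intro i j
    unfold pvEntry
    by_cases hi : i < memo0.size
    · rw [hrowv i hi]
      exact pvRepl _ _
    · rw [Array.getElem?_eq_none (xs := memo0) (by omega)]
      show (((#[] : Array (Option Int))[j]?).getD none) = none
      rw [Array.getElem?_eq_none (by simp)]
      rfl
  have hd0 : pvDims steps limit memo0 := ⟨hsz, hrows⟩
  have hok0 : pvMOK limit memo0 := by
    intro i j v h
    rw [hent0 i j] at h
    cases h
  have hfree0 : pvFree memo0 = (steps + 1).toNat * (limit + 1).toNat := by
    rw [pvFree, htl]
    simp only [List.map_map]
    rw [show ((fun row => List.countP (fun o => o.isNone) (Array.toList row)) ∘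
        (fun _ : Int => Array.replicate (limit + 1).toNat (none : Option Int)))
        = (fun _ : Int => (limit + 1).toNat) from by
      funext x
      simp only [Function.comp_apply]
      rw [show (Array.replicate (limit + 1).toNat (none : Option Int)).toList
          = List.replicate (limit + 1).toNat none from Array.toList_replicate,
        List.countP_replicate]
      simp]
    rw [List.map_const', List.sum_replicate, smul_eq_mul, pvRange_len _ (by omega)]
  obtain ⟨k, memo', hd', hok', hk, hext, hsome, hnew, heq⟩ :=
    pvStep steps limit steps.toNat 0 steps rfl hs le_rfl le_rfl hl0 memo0 hd0 hok0
  have hkb : k ≤ 4 * ((steps + 1).toNat * (limit + 1).toNat) + 1 := by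
    rw [hfree0] at hk
    omega
  show (pvMGet (pvLoop limit (4 * ((steps + 1).toNat * (limit + 1).toNat) + 2)
      [((0 : Int), steps, false)] memo0) steps 0).getD 0 = pvG limit steps.toNat 0
  rw [show 4 * ((steps + 1).toNat * (limit + 1).toNat) + 2
      = (4 * ((steps + 1).toNat * (limit + 1).toNat) + 2 - k) + k by omega,
    heq (4 * ((steps + 1).toNat * (limit + 1).toNat) + 2 - k) [], pvLoop_nil,
    pvMGet_entry memo' steps 0]
  obtain ⟨v, hv⟩ := Option.isSome_iff_exists.mp hsome
  rw [hv]
  have hval := hok' _ _ _ hv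
  norm_num at hval
  simpa using hval

-- List-level model of A's table operations (the Array port is bridged to this model)
def pvGet2 (dp : List (List Int)) (i j : Int) : Int :=
  PySem.List.pyGetD (PySem.List.pyGetD dp i []) j 0

def pvSet2 (dp : List (List Int)) (i j : Int) (v : Int) : List (List Int) :=
  PySem.List.pySetD dp i (PySem.List.pySetD (PySem.List.pyGetD dp i []) j v)

def pvInnerBodyL (maxPos i : Int) (dp : List (List Int)) (j : Int) : List (List Int) :=
  let dp := pvSet2 dp i j (pvGet2 dp (i-1) j)
  let dp := if j > 0 then
      pvSet2 dp i j (PySem.Int.mod (pvGet2 dp i j + pvGet2 dp (i-1) (j-1)) 1000000007)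
    else dp
  if j < maxPos then
    pvSet2 dp i j (PySem.Int.mod (pvGet2 dp i j + pvGet2 dp (i-1) (j+1)) 1000000007)
  else dp

def pvOuterBodyL (maxPos : Int) (dp : List (List Int)) (i : Int) : List (List Int) :=
  (PySem.List.pyRange 0 (maxPos + 1)).foldl (pvInnerBodyL maxPos i) dp

-- the per-cell recurrence with one modular reduction, and the per-step row rebuild
def pvBval (W : Int) (r : List Int) (j : Int) : Int :=
  PySem.Int.mod (PySem.List.pyGetD r j 0
    + (if j > 0 then PySem.List.pyGetD r (j-1) 0 else 0)
    + (if j + 1 < W then PySem.List.pyGetD r (j+1) 0 else 0)) 1000000007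

def pvBstep (W : Int) (r : List Int) : List Int :=
  (PySem.List.pyRange 0 W).map (pvBval W r)

-- row after k steps
def pvBrow (W : Int) : Nat → List Int
  | 0 => 1 :: List.replicate (W - 1).toNat 0
  | k+1 => pvBstep W (pvBrow W k)

-- A's per-cell value (the net effect of one inner-loop iteration on cell j, reading row i-1 = r)
def pvAval (W : Int) (r : List Int) (j : Int) : Int :=
  let v := PySem.List.pyGetD r j 0
  let v := if j > 0 then PySem.Int.mod (v + PySem.List.pyGetD r (j-1) 0) 1000000007 else v
  if j < W - 1 then PySem.Int.mod (v + PySem.List.pyGetD r (j+1) 0) 1000000007 else v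

def pvAmap (W : Int) (r : List Int) : List Int :=
  (PySem.List.pyRange 0 W).map (pvAval W r)

def pvInv (r : List Int) : Prop := ∀ x ∈ r, 0 ≤ x ∧ x < 1000000007

lemma pvGetD_pySetD_int {α : Type} (xs : List α) (i j : Int) (v d : α)
    (h0 : 0 ≤ i) (hi : i < xs.length) (h0j : 0 ≤ j) :
    PySem.List.pyGetD (PySem.List.pySetD xs i v) j d = if j = i then v else PySem.List.pyGetD xs j d := by
  rw [show i = ((i.toNat : Nat) : Int) by omega, show j = ((j.toNat : Nat) : Int) by omega,
    PySem.List.pyGetD_pySetD_natCast xs i.toNat j.toNat v d (by omega)]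
  by_cases h : j.toNat = i.toNat
  · simp [h]
  · rw [if_neg h, if_neg (by exact_mod_cast h)]

lemma pvSetD_setD_self {α : Type} (xs : List α) (i : Int) (a b : α) (h0 : 0 ≤ i) :
    PySem.List.pySetD (PySem.List.pySetD xs i a) i b = PySem.List.pySetD xs i b := by
  rw [PySem.List.pySetD_of_nonneg _ _ h0, PySem.List.pySetD_of_nonneg _ _ h0,
    PySem.List.pySetD_of_nonneg _ _ h0, List.set_set]

lemma pvSetD_self (xs : List (List Int)) (i : Int) (h0 : 0 ≤ i) (hi : i < xs.length) :
    PySem.List.pySetD xs i (PySem.List.pyGetD xs i []) = xs := by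
  rw [PySem.List.pySetD_of_nonneg _ _ h0, PySem.List.pyGetD_eq_getElem xs _ h0 hi,
    List.set_getElem_self]

lemma pvBrow_inv (W : Int) (hW : 1 ≤ W) (k : Nat) :
    pvInv (pvBrow W k) ∧ (pvBrow W k).length = W.toNat := by
  induction k with
  | zero =>
    constructor
    · intro x hx
      rcases List.mem_cons.mp hx with h | h
      · omega
      · have := (List.eq_of_mem_replicate h); omega
    · simp [pvBrow]; omega
  | succ k ih =>
    constructor
    · intro x hx
      have : ∃ j ∈ PySem.List.pyRange 0 W, pvBval W (pvBrow W k) j = x := by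
        simpa [pvBrow, pvBstep] using hx
      obtain ⟨j, _, hj⟩ := this
      rw [← hj]
      unfold pvBval
      have h1 := PySem.Int.mod_nonneg (a := PySem.List.pyGetD (pvBrow W k) j 0
        + (if j > 0 then PySem.List.pyGetD (pvBrow W k) (j-1) 0 else 0)
        + (if j + 1 < W then PySem.List.pyGetD (pvBrow W k) (j+1) 0 else 0))
        (b := 1000000007) (by norm_num)
      have h2 := PySem.Int.mod_lt (a := PySem.List.pyGetD (pvBrow W k) j 0
        + (if j > 0 then PySem.List.pyGetD (pvBrow W k) (j-1) 0 else 0)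
        + (if j + 1 < W then PySem.List.pyGetD (pvBrow W k) (j+1) 0 else 0))
        (b := 1000000007) (by norm_num)
      omega
    · simp [pvBrow, pvBstep, pvRange_len W (by omega)]

lemma pvAval_eq_bval (W : Int) (_hW : 1 ≤ W) (r : List Int) (hr : pvInv r)
    (hl : r.length = W.toNat) (j : Int) (hj0 : 0 ≤ j) (hjW : j < W) :
    pvAval W r j = pvBval W r j := by
  have hM : (0:Int) < 1000000007 := by norm_num
  have hc : (j + 1 < W) = (j < W - 1) := by apply propext; omega
  unfold pvAval pvBval
  simp only [hc]
  by_cases h0 : j > 0 <;> by_cases h1 : j < W - 1 <;>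
      simp only [h0, h1, if_true, if_false]
  · rw [PySem.Int.mod_eq_emod_of_pos hM, PySem.Int.mod_eq_emod_of_pos hM,
      PySem.Int.mod_eq_emod_of_pos hM]
    omega
  · ring_nf
  · ring_nf
  · have hj : j = 0 := by omega
    have hW1 : W = 1 := by omega
    have hmem : PySem.List.pyGetD r j 0 ∈ r := by
      rw [PySem.List.pyGetD_eq_getElem r 0 hj0 (by omega)]
      exact List.getElem_mem _
    have hb := hr _ hmem
    rw [add_zero, add_zero, PySem.Int.mod_eq_emod_of_pos hM, Int.emod_eq_of_lt hb.1 hb.2]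

lemma pvAmap_eq_bstep (W : Int) (hW : 1 ≤ W) (r : List Int) (hr : pvInv r)
    (hl : r.length = W.toNat) : pvAmap W r = pvBstep W r := by
  unfold pvAmap pvBstep
  apply List.map_congr_left
  intro j hj
  have := PySem.List.mem_pyRange_one.mp hj
  exact pvAval_eq_bval W hW r hr hl j this.1 this.2

lemma pvSet2_setD (dp : List (List Int)) (i j : Int) (pr : List Int) (v : Int)
    (h0 : 0 ≤ i) (hiL : i < dp.length) :
    pvSet2 (PySem.List.pySetD dp i pr) i j v = PySem.List.pySetD dp i (PySem.List.pySetD pr j v) := by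
  unfold pvSet2
  rw [pvGetD_pySetD_int dp i i pr [] h0 hiL h0, if_pos rfl, pvSetD_setD_self _ _ _ _ h0]

lemma pvGet2_prev (dp : List (List Int)) (i j : Int) (pr : List Int)
    (h1 : 1 ≤ i) (hiL : i < dp.length) :
    pvGet2 (PySem.List.pySetD dp i pr) (i-1) j = PySem.List.pyGetD (PySem.List.pyGetD dp (i-1) []) j 0 := by
  unfold pvGet2
  rw [pvGetD_pySetD_int dp i (i-1) pr [] (by omega) hiL (by omega), if_neg (by omega)]

lemma pvGet2_self (dp : List (List Int)) (i j : Int) (pr : List Int)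
    (h0 : 0 ≤ i) (hiL : i < dp.length) :
    pvGet2 (PySem.List.pySetD dp i pr) i j = PySem.List.pyGetD pr j 0 := by
  unfold pvGet2
  rw [pvGetD_pySetD_int dp i i pr [] h0 hiL h0, if_pos rfl]

lemma pvGetD_setD_same (pr : List Int) (j : Int) (v : Int) (h0 : 0 ≤ j) (hj : j < pr.length) :
    PySem.List.pyGetD (PySem.List.pySetD pr j v) j 0 = v := by
  rw [pvGetD_pySetD_int pr j j v 0 h0 hj h0, if_pos rfl]

-- one iteration of A's inner loop on a table whose row i has been partially rewritten
lemma pvInnerBody_step (W i : Int) (dp : List (List Int)) (pr : List Int) (j : Int)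
    (h0i : 0 ≤ i) (hi1 : 1 ≤ i) (hiL : i < dp.length) (h0j : 0 ≤ j) (hj : j < pr.length) :
    pvInnerBodyL (W-1) i (PySem.List.pySetD dp i pr) j
      = PySem.List.pySetD dp i (PySem.List.pySetD pr j
          (pvAval W (PySem.List.pyGetD dp (i-1) []) j)) := by
  have hjL : j < (pr.length : Int) := by exact_mod_cast hj
  simp only [pvInnerBodyL, pvAval]
  rw [pvGet2_prev dp i j pr hi1 hiL, pvSet2_setD dp i j pr _ h0i hiL]
  by_cases h0 : j > 0 <;> by_cases h1 : j < W - 1 <;>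
      simp only [h0, h1, if_true, if_false]
  · rw [pvGet2_self dp i j _ h0i hiL, pvGetD_setD_same pr j _ h0j hjL,
      pvGet2_prev dp i (j-1) _ hi1 hiL, pvSet2_setD dp i j _ _ h0i hiL,
      pvSetD_setD_self pr j _ _ h0j,
      pvGet2_self dp i j _ h0i hiL, pvGetD_setD_same pr j _ h0j hjL,
      pvGet2_prev dp i (j+1) _ hi1 hiL, pvSet2_setD dp i j _ _ h0i hiL,
      pvSetD_setD_self pr j _ _ h0j]
  · rw [pvGet2_self dp i j _ h0i hiL, pvGetD_setD_same pr j _ h0j hjL,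
      pvGet2_prev dp i (j-1) _ hi1 hiL, pvSet2_setD dp i j _ _ h0i hiL,
      pvSetD_setD_self pr j _ _ h0j]
  · rw [pvGet2_self dp i j _ h0i hiL, pvGetD_setD_same pr j _ h0j hjL,
      pvGet2_prev dp i (j+1) _ hi1 hiL, pvSet2_setD dp i j _ _ h0i hiL,
      pvSetD_setD_self pr j _ _ h0j]

lemma pvInnerAux (W : Int) (_hW : 1 ≤ W) (dp : List (List Int)) (i : Int)
    (hi : 1 ≤ i) (hiL : i < dp.length)
    (hrow : (PySem.List.pyGetD dp i []).length = W.toNat) :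
    ∀ m : Nat, m ≤ W.toNat →
    (PySem.List.pyRange 0 (m : Int)).foldl (pvInnerBodyL (W-1) i) dp
      = PySem.List.pySetD dp i
          (((PySem.List.pyRange 0 (m : Int)).map (pvAval W (PySem.List.pyGetD dp (i-1) [])))
            ++ (PySem.List.pyGetD dp i []).drop m) := by
  intro m
  induction m with
  | zero =>
    intro _
    have h0 : PySem.List.pyRange 0 ((0:Nat) : Int) = [] := by
      rw [PySem.List.pyRange_zero_natCast]; rfl
    rw [h0]
    simp only [List.foldl_nil, List.map_nil, List.nil_append, List.drop_zero]
    rw [pvSetD_self dp i (by omega) hiL]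
  | succ m ih =>
    intro hm
    have hsplit : PySem.List.pyRange 0 ((m+1 : Nat) : Int)
        = PySem.List.pyRange 0 (m : Int) ++ [(m : Int)] := by
      push_cast
      exact PySem.List.pyRange_one_succ_right (by positivity)
    have hmlen : ((PySem.List.pyRange 0 (m : Int)).map
        (pvAval W (PySem.List.pyGetD dp (i-1) []))).length = m := by
      rw [List.length_map, pvRange_len _ (by positivity)]; omega
    have hprlen : (((PySem.List.pyRange 0 (m : Int)).map
          (pvAval W (PySem.List.pyGetD dp (i-1) [])))
            ++ (PySem.List.pyGetD dp i []).drop m).length = W.toNat := by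
      rw [List.length_append, hmlen, List.length_drop, hrow]; omega
    rw [hsplit, List.foldl_append, ih (by omega), List.foldl_cons, List.foldl_nil,
      pvInnerBody_step W i dp _ _ (by omega) hi hiL (by positivity)
        (by rw [hprlen]; omega)]
    congr 1
    rw [List.map_append, List.map_cons, List.map_nil,
      PySem.List.pySetD_of_nonneg _ _ (by positivity), Int.toNat_natCast]
    have hdrop : (PySem.List.pyGetD dp i []).drop m
        = (PySem.List.pyGetD dp i [])[m]'(by omega) :: (PySem.List.pyGetD dp i []).drop (m+1) :=
      List.drop_eq_getElem_cons (by omega)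
    rw [hdrop, List.set_append, hmlen]
    simp
    rw [hdrop, List.set_cons_zero]

-- the inner loop writes exactly A's new row i, computed from row i-1
lemma pvInner (W : Int) (hW : 1 ≤ W) (dp : List (List Int)) (i : Int)
    (hi : 1 ≤ i) (hiL : i < dp.length)
    (hrows : ∀ k < dp.length, (dp.getD k []).length = W.toNat) :
    (PySem.List.pyRange 0 W).foldl (pvInnerBodyL (W - 1) i) dp
      = PySem.List.pySetD dp i (pvAmap W (PySem.List.pyGetD dp (i-1) [])) := by
  have h0i : (0:Int) ≤ i := by omega
  have hiN : i.toNat < dp.length := by omega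
  have hrow : (PySem.List.pyGetD dp i []).length = W.toNat := by
    rw [PySem.List.pyGetD_eq_getElem dp [] h0i hiL]
    have h := hrows i.toNat hiN
    rwa [List.getD_eq_getElem dp [] hiN] at h
  have key := pvInnerAux W hW dp i hi hiL hrow W.toNat (le_refl _)
  rw [show ((W.toNat : Nat) : Int) = W by omega] at key
  rw [key]
  congr 1
  rw [List.drop_of_length_le (le_of_eq hrow), List.append_nil]
  rfl

-- getD after set on a nested list
lemma pvGetD_set (l : List (List Int)) (i k : Nat) (v : List Int) (hi : i < l.length) :
    (l.set i v).getD k [] = if k = i then v else l.getD k [] := by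
  by_cases hk : k < l.length
  · rw [List.getD_eq_getElem _ [] (by simpa using hk), List.getElem_set]
    by_cases h : k = i
    · simp [h]
    · rw [if_neg (by omega), if_neg h, List.getD_eq_getElem _ [] hk]
  · rw [if_neg (by omega), List.getD_eq_getElem?_getD, List.getD_eq_getElem?_getD,
      List.getElem?_eq_none (by simpa using hk), List.getElem?_eq_none (by omega)]

-- the outer loop fills rows 1..n with the rolling rows
lemma pvOuter (W : Int) (hW : 1 ≤ W) (S : Nat) (n : Nat) (hn : n ≤ S)
    (dp : List (List Int)) (hL : dp.length = S + 1)
    (hrows : ∀ k < S + 1, (dp.getD k []).length = W.toNat)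
    (h0 : dp.getD 0 [] = pvBrow W 0) :
    ((PySem.List.pyRange 1 ((n : Int) + 1)).foldl (pvOuterBodyL (W - 1)) dp).length = S + 1 ∧
    (∀ k < S + 1,
      (((PySem.List.pyRange 1 ((n : Int) + 1)).foldl (pvOuterBodyL (W - 1)) dp).getD k []).length
        = W.toNat) ∧
    (∀ k ≤ n,
      ((PySem.List.pyRange 1 ((n : Int) + 1)).foldl (pvOuterBodyL (W - 1)) dp).getD k []
        = pvBrow W k) := by
  induction n with
  | zero =>
    have he : PySem.List.pyRange 1 (((0:Nat) : Int) + 1) = [] := by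
      norm_num [PySem.List.pyRange]
    rw [he]
    simp only [List.foldl_nil]
    exact ⟨hL, hrows, fun k hk => by rw [Nat.le_zero.mp hk]; exact h0⟩
  | succ n ih =>
    obtain ⟨iL, iR, iV⟩ := ih (by omega)
    have hsplit : PySem.List.pyRange 1 (((n+1 : Nat) : Int) + 1)
        = PySem.List.pyRange 1 ((n : Int) + 1) ++ [(n : Int) + 1] := by
      push_cast
      rw [show (n : Int) + 1 + 1 = ((n : Int) + 1) + 1 by ring]
      exact PySem.List.pyRange_one_succ_right (by omega)
    set T := (PySem.List.pyRange 1 ((n : Int) + 1)).foldl (pvOuterBodyL (W - 1)) dp with hT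
    have hstep : pvOuterBodyL (W - 1) T ((n : Int) + 1)
        = PySem.List.pySetD T ((n : Int) + 1) (pvAmap W (PySem.List.pyGetD T (n : Int) [])) := by
      unfold pvOuterBodyL
      rw [show W - 1 + 1 = W by ring,
        pvInner W hW T ((n : Int) + 1) (by omega) (by rw [iL]; push_cast; omega)
          (fun k hk => iR k (by omega)),
        show (n : Int) + 1 - 1 = (n : Int) by ring]
    have hprev : PySem.List.pyGetD T (n : Int) [] = pvBrow W n := by
      rw [PySem.List.pyGetD_natCast]
      exact iV n (le_refl _)
    have hset : PySem.List.pySetD T ((n : Int) + 1) (pvAmap W (PySem.List.pyGetD T (n : Int) []))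
        = T.set (n+1) (pvBrow W (n+1)) := by
      rw [hprev, pvAmap_eq_bstep W hW _ (pvBrow_inv W hW n).1 (pvBrow_inv W hW n).2,
        PySem.List.pySetD_of_nonneg _ _ (by omega),
        show ((n : Int) + 1).toNat = n + 1 by omega]
      rfl
    rw [hsplit, List.foldl_append, List.foldl_cons, List.foldl_nil, ← hT, hstep, hset]
    refine ⟨by simpa using iL, ?_, ?_⟩
    · intro k hk
      rw [pvGetD_set T (n+1) k _ (by omega)]
      by_cases h : k = n + 1
      · rw [if_pos h]; exact (pvBrow_inv W hW (n+1)).2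
      · rw [if_neg h]; exact iR k hk
    · intro k hk
      rw [pvGetD_set T (n+1) k _ (by omega)]
      by_cases h : k = n + 1
      · rw [if_pos h, h]
      · rw [if_neg h]; exact iV k (by omega)

-- ===== Array-to-List bridge for port A =====
def pvAbs (dp : Array (Array Int)) : List (List Int) := dp.toList.map Array.toList

lemma pvArrGetD {α : Type} (a : Array α) (n : Nat) (d : α) : a.getD n d = a.toList.getD n d := by
  simp [Array.getD, List.getD]
  split
  case isTrue h => simp [Array.getElem?_eq_getElem h]
  case isFalse h => simp [Array.getElem?_eq_none (show a.size ≤ n by omega)]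

lemma pvListGetD_map {α β : Type} (f : α → β) (l : List α) (n : Nat) (d : α) :
    (l.map f).getD n (f d) = f (l.getD n d) := by
  by_cases h : n < l.length
  · rw [List.getD_eq_getElem _ _ (by simpa using h), List.getD_eq_getElem _ _ h, List.getElem_map]
  · rw [List.getD_eq_getElem?_getD, List.getD_eq_getElem?_getD,
      List.getElem?_eq_none (by simpa using h), List.getElem?_eq_none (by omega)]
    rfl

lemma pvAbs_getD (dp : Array (Array Int)) (n : Nat) :
    (pvAbs dp).getD n [] = (dp.getD n #[]).toList := by
  unfold pvAbs
  rw [show ([] : List Int) = Array.toList (#[] : Array Int) from rfl, pvListGetD_map,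
    pvArrGetD]

lemma pvGetCell_abs (dp : Array (Array Int)) (i j : Int) (h0i : 0 ≤ i) (h0j : 0 ≤ j) :
    pvGetCell dp i j = pvGet2 (pvAbs dp) i j := by
  unfold pvGetCell pvGet2
  rw [show i = ((i.toNat : Nat) : Int) by omega, show j = ((j.toNat : Nat) : Int) by omega,
    PySem.List.pyGetD_natCast, PySem.List.pyGetD_natCast, Int.toNat_natCast, Int.toNat_natCast,
    pvAbs_getD, pvArrGetD]

lemma pvModify_eq (L : List (List Int)) (n : Nat) (f : List Int → List Int) :
    L.modify n f = L.set n (f (L.getD n [])) := by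
  by_cases h : n < L.length
  · rw [List.modify_eq_set_get f h, List.getD_eq_getElem _ _ h]
    rfl
  · rw [List.modify_eq_self (by omega), List.set_eq_of_length_le (by omega)]

lemma pvMap_modify {α β : Type} (g : α → β) (f : α → α) (f' : β → β)
    (hc : ∀ x, g (f x) = f' (g x)) (l : List α) (n : Nat) :
    (l.modify n f).map g = (l.map g).modify n f' := by
  by_cases h : n < l.length
  · rw [List.modify_eq_set_get f h, List.modify_eq_set_get f' (by simpa using h),
      List.map_set, hc]
    simp [List.get_eq_getElem, List.getElem_map]
  · rw [List.modify_eq_self (by omega), List.modify_eq_self (by simp; omega)]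

lemma pvSetCell_abs (dp : Array (Array Int)) (i j : Int) (v : Int)
    (h0i : 0 ≤ i) (h0j : 0 ≤ j) :
    pvAbs (pvSetCell dp i j v) = pvSet2 (pvAbs dp) i j v := by
  unfold pvSetCell pvSet2
  rw [show i = ((i.toNat : Nat) : Int) by omega, show j = ((j.toNat : Nat) : Int) by omega,
    PySem.List.pyGetD_natCast, PySem.List.pySetD_natCast, PySem.List.pySetD_natCast,
    Int.toNat_natCast, Int.toNat_natCast]
  show ((dp.modify i.toNat (fun row => row.setIfInBounds j.toNat v)).toList.map Array.toList) = _
  rw [Array.toList_modify,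
    pvMap_modify Array.toList _ (fun row => row.set j.toNat v)
      (fun x => Array.toList_setIfInBounds) _ i.toNat,
    pvModify_eq]
  rfl

lemma pvFoldl_abs {σ τ : Type} (abs : σ → τ) (l : List Int) (fA : σ → Int → σ)
    (fL : τ → Int → τ)
    (h : ∀ j ∈ l, ∀ dp, abs (fA dp j) = fL (abs dp) j) :
    ∀ dp, abs (l.foldl fA dp) = l.foldl fL (abs dp) := by
  induction l with
  | nil => intro dp; rfl
  | cons a t ih =>
    intro dp
    rw [List.foldl_cons, List.foldl_cons,
      ih (fun j hj => h j (List.mem_cons_of_mem _ hj)), h a List.mem_cons_self]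

lemma pvInnerBodyA_abs (maxPos i : Int) (hi : 1 ≤ i) (dp : Array (Array Int))
    (j : Int) (hj : 0 ≤ j) :
    pvAbs (pvInnerBody maxPos i dp j) = pvInnerBodyL maxPos i (pvAbs dp) j := by
  have hS : ∀ (X : Array (Array Int)) (v : Int),
      pvAbs (pvSetCell X i j v) = pvSet2 (pvAbs X) i j v :=
    fun X v => pvSetCell_abs X i j v (by omega) hj
  have hG0 : ∀ X : Array (Array Int), pvGetCell X (i-1) j = pvGet2 (pvAbs X) (i-1) j :=
    fun X => pvGetCell_abs X (i-1) j (by omega) hj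
  have hGi : ∀ X : Array (Array Int), pvGetCell X i j = pvGet2 (pvAbs X) i j :=
    fun X => pvGetCell_abs X i j (by omega) hj
  simp only [pvInnerBody, pvInnerBodyL]
  by_cases h0 : j > 0 <;> by_cases h1 : j < maxPos <;>
      simp only [h0, h1, if_true, if_false]
  · have hGm : ∀ X : Array (Array Int),
        pvGetCell X (i-1) (j-1) = pvGet2 (pvAbs X) (i-1) (j-1) :=
      fun X => pvGetCell_abs X (i-1) (j-1) (by omega) (by omega)
    have hGp : ∀ X : Array (Array Int),
        pvGetCell X (i-1) (j+1) = pvGet2 (pvAbs X) (i-1) (j+1) :=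
      fun X => pvGetCell_abs X (i-1) (j+1) (by omega) (by omega)
    simp only [hG0, hGi, hGm, hGp, hS]
  · have hGm : ∀ X : Array (Array Int),
        pvGetCell X (i-1) (j-1) = pvGet2 (pvAbs X) (i-1) (j-1) :=
      fun X => pvGetCell_abs X (i-1) (j-1) (by omega) (by omega)
    simp only [hG0, hGi, hGm, hS]
  · have hGp : ∀ X : Array (Array Int),
        pvGetCell X (i-1) (j+1) = pvGet2 (pvAbs X) (i-1) (j+1) :=
      fun X => pvGetCell_abs X (i-1) (j+1) (by omega) (by omega)
    simp only [hG0, hGi, hGp, hS]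
  · simp only [hG0, hS]

lemma pvOuterBodyA_abs (maxPos i : Int) (dp : Array (Array Int)) (hi : 1 ≤ i) :
    pvAbs (pvOuterBody maxPos dp i) = pvOuterBodyL maxPos (pvAbs dp) i := by
  unfold pvOuterBody pvOuterBodyL
  exact pvFoldl_abs pvAbs _ _ _
    (fun j hj dp' => pvInnerBodyA_abs maxPos i hi dp' j
      (PySem.List.mem_pyRange_one.mp hj).1) dp

lemma pvA_eq (steps arrLen : Int) (hs : 0 ≤ steps) (ha : 1 ≤ arrLen) :
    numWays steps arrLen
      = PySem.List.pyGetD (pvBrow (min arrLen (steps + 1)) steps.toNat) 0 0 := by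
  obtain ⟨S, rfl⟩ : ∃ S : Nat, steps = (S : Int) := ⟨steps.toNat, by omega⟩
  have hW : 1 ≤ min arrLen ((S : Int) + 1) := by omega
  simp only [numWays,
    show min (arrLen - 1) (S : Int) = min arrLen ((S : Int) + 1) - 1 from by omega,
    show min arrLen ((S : Int) + 1) - 1 + 1 = min arrLen ((S : Int) + 1) from by ring,
    Int.toNat_natCast]
  rw [pvGetCell_abs _ (S : Int) 0 (by omega) (by omega),
    pvFoldl_abs pvAbs _ _ (pvOuterBodyL (min arrLen ((S : Int) + 1) - 1))
      (fun i hi dp => pvOuterBodyA_abs _ i dp (PySem.List.mem_pyRange_one.mp hi).1) _,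
    pvSetCell_abs _ 0 0 1 (by omega) (by omega),
    show pvAbs (((PySem.List.pyRange 0 ((S : Int) + 1)).map
        (fun _ => Array.replicate (min arrLen ((S : Int) + 1)).toNat (0:Int))).toArray)
      = (PySem.List.pyRange 0 ((S : Int) + 1)).map
          (fun _ => List.replicate (min arrLen ((S : Int) + 1)).toNat (0:Int)) from by
      unfold pvAbs
      simp [Array.toList_replicate]]
  set W := min arrLen ((S : Int) + 1) with hWd
  set dp0 := (PySem.List.pyRange 0 ((S : Int) + 1)).map
    (fun _ => List.replicate W.toNat (0:Int)) with hdp0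
  have hlen0 : dp0.length = S + 1 := by
    rw [hdp0, List.length_map, pvRange_len _ (by omega)]; omega
  have hrow0 : ∀ k < S + 1, dp0.getD k [] = List.replicate W.toNat (0:Int) := by
    intro k hk
    rw [List.getD_eq_getElem _ [] (by omega)]
    simp only [hdp0, List.getElem_map]
  have hT0 : pvSet2 dp0 0 0 1 = dp0.set 0 (pvBrow W 0) := by
    unfold pvSet2
    rw [show PySem.List.pyGetD dp0 0 [] = dp0.getD 0 [] from PySem.List.pyGetD_zero dp0 [],
      hrow0 0 (by omega),
      PySem.List.pySetD_of_nonneg _ _ (by omega), PySem.List.pySetD_of_nonneg _ _ (by omega)]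
    congr 1
    rw [show W.toNat = (W - 1).toNat + 1 by omega, List.replicate_succ, Int.toNat_zero,
      List.set_cons_zero]
    rfl
  rw [hT0]
  have hrows : ∀ k < S + 1, ((dp0.set 0 (pvBrow W 0)).getD k []).length = W.toNat := by
    intro k hk
    rw [pvGetD_set dp0 0 k _ (by omega)]
    by_cases h : k = 0
    · rw [if_pos h]; exact (pvBrow_inv W hW 0).2
    · rw [if_neg h, hrow0 k hk, List.length_replicate]
  have h00 : (dp0.set 0 (pvBrow W 0)).getD 0 [] = pvBrow W 0 := by
    rw [pvGetD_set dp0 0 0 _ (by omega), if_pos rfl]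
  obtain ⟨-, -, hV⟩ := pvOuter W hW S S (le_refl _) (dp0.set 0 (pvBrow W 0))
    (by rw [List.length_set, hlen0]) hrows h00
  unfold pvGet2
  rw [PySem.List.pyGetD_natCast, hV S (le_refl _)]

-- rows are zero beyond the diagonal: after n steps positions > n are unreachable
lemma pvRow_diag (limit : Int) (_hl : 0 ≤ limit) (n : Nat) :
    ∀ p : Int, 0 ≤ p → p ≤ limit → (n : Int) < p →
      PySem.List.pyGetD (pvBrow (limit + 1) n) p 0 = 0 := by
  induction n with
  | zero =>
    intro p hp0 hpl hnp
    rw [show pvBrow (limit + 1) 0 = 1 :: List.replicate (limit + 1 - 1).toNat 0 from rfl,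
      PySem.List.pyGetD_eq_getElem _ _ hp0 (by simp [List.length_replicate]; omega)]
    have hne : p.toNat ≠ 0 := by omega
    simp [List.getElem_cons, hne, List.getElem_replicate]
  | succ n ih =>
    intro p hp0 hpl hnp
    rw [show pvBrow (limit + 1) (n + 1)
        = (PySem.List.pyRange 0 (limit + 1)).map (pvBval (limit + 1) (pvBrow (limit + 1) n))
        from rfl,
      PySem.List.pyGetD_map_pyRange_of_nonneg _ _ _ _ hp0 (by omega)]
    unfold pvBval
    rw [if_pos (show p > 0 by omega), ih p hp0 hpl (by omega),
      ih (p - 1) (by omega) (by omega) (by omega)]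
    by_cases h : p + 1 < limit + 1
    · rw [if_pos h, ih (p + 1) (by omega) (by omega) (by omega)]
      decide
    · rw [if_neg h]
      decide

-- the demand-driven value agrees with the rolling row
lemma pvG_eq_row (limit : Int) (hl : 0 ≤ limit) (n : Nat) :
    ∀ p : Int, 0 ≤ p → p ≤ limit →
      pvG limit n p = PySem.List.pyGetD (pvBrow (limit + 1) n) p 0 := by
  induction n with
  | zero =>
    intro p hp0 hpl
    simp only [pvG]
    by_cases h : p = 0
    · subst h
      rw [if_pos rfl,
        show pvBrow (limit + 1) 0 = 1 :: List.replicate (limit + 1 - 1).toNat 0 from rfl,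
        PySem.List.pyGetD_zero_cons]
    · rw [if_neg h,
        show pvBrow (limit + 1) 0 = 1 :: List.replicate (limit + 1 - 1).toNat 0 from rfl,
        PySem.List.pyGetD_eq_getElem _ _ hp0 (by simp [List.length_replicate]; omega)]
      have hne : p.toNat ≠ 0 := by omega
      simp [List.getElem_cons, hne, List.getElem_replicate]
  | succ n ih =>
    intro p hp0 hpl
    rw [show pvBrow (limit + 1) (n + 1)
        = (PySem.List.pyRange 0 (limit + 1)).map (pvBval (limit + 1) (pvBrow (limit + 1) n))
        from rfl,
      PySem.List.pyGetD_map_pyRange_of_nonneg _ _ _ _ hp0 (by omega)]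
    simp only [pvG]
    unfold pvBval
    by_cases hd : p > (n : Int) + 1
    · rw [if_pos hd, if_pos (show p > 0 by omega),
        pvRow_diag limit hl n p hp0 hpl (by omega),
        pvRow_diag limit hl n (p - 1) (by omega) (by omega) (by omega)]
      by_cases h : p + 1 < limit + 1
      · rw [if_pos h, pvRow_diag limit hl n (p + 1) (by omega) (by omega) (by omega)]
        decide
      · rw [if_neg h]
        decide
    · rw [if_neg hd, if_pos (show 0 ≤ p ∧ p ≤ limit from ⟨hp0, hpl⟩), ih p hp0 hpl]
      congr 1
      by_cases h1 : p > 0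
      · rw [if_pos h1, if_pos (show 0 ≤ p - 1 ∧ p - 1 ≤ limit by omega),
          ih (p - 1) (by omega) (by omega)]
        by_cases h2 : p + 1 < limit + 1
        · rw [if_pos h2, if_pos (show 0 ≤ p + 1 ∧ p + 1 ≤ limit by omega),
            ih (p + 1) (by omega) (by omega)]
        · rw [if_neg h2, if_neg (show ¬(0 ≤ p + 1 ∧ p + 1 ≤ limit) by omega)]
      · rw [if_neg h1, if_neg (show ¬(0 ≤ p - 1 ∧ p - 1 ≤ limit) by omega)]
        by_cases h2 : p + 1 < limit + 1
        · rw [if_pos h2, if_pos (show 0 ≤ p + 1 ∧ p + 1 ≤ limit by omega),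
            ih (p + 1) (by omega) (by omega)]
        · rw [if_neg h2, if_neg (show ¬(0 ≤ p + 1 ∧ p + 1 ≤ limit) by omega)]

-- ===== VERDICT (by name: the statement is the Claim_ definition above) =====
theorem numWays_spec : Claim_equal_numWays := by
  intro steps arrLen _ hpre
  unfold Spec_numWays
  have hlim : (0:Int) ≤ min (arrLen - 1) steps := by
    rcases hpre with ⟨h1, h2⟩; omega
  rw [pvA_eq steps arrLen hpre.1 hpre.2, pvB_eq steps arrLen hpre.1 hpre.2,
    pvG_eq_row _ hlim steps.toNat 0 le_rfl hlim,
    show min (arrLen - 1) steps + 1 = min arrLen (steps + 1) by omega]
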